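-- pv_equiv track=rewrite | github.com/harshh-13/Algorithm-Toolbox | Algorithm Toolbox/week2/fibonacci_huge.py | fibonacci_huge
-- ===== SOURCE A (Python) =====
-- def fibonacci_huge(h,n):
--     if n<=1:
--         return 0
--     s=[]
--     a=0;k=0;b=1
--     while s[:k]!=s[k:] or k<1:
--         s.append(a%n)
--         k=len(s)//2
--         a,b=b,a+b
--     return s[h%k]
-- ===== SOURCE B (Python) =====
-- def fibonacci_huge(h, n):
--     if n <= 1:
--         return 0
--     # find the Pisano period: smallest t >= 1 with (F_t, F_{t+1}) == (0, 1) mod n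
--     a, b = 0, 1
--     period = 0
--     while True:
--         a, b = b, (a + b) % n
--         period += 1
--         if a == 0 and b == 1:
--             break
--     # recompute F(h mod period) mod n directly
--     x, y = 0, 1
--     for _ in range(h % period):
--         x, y = y, (x + y) % n
--     return x
-- ===== Notes on version B (the rewrite author's own statement) =====
-- stated objective: alternative
-- what changed: B detects the Pisano period with a constant-time per-step test of whether the residue pair has returned to its starting value, instead of A's growing list with a full s[:k]!=s[k:] halves comparison every iteration, and then recomputes F(h mod period) mod n directly instead of indexing a stored double-period list; intended as asymptotically faster (O(P) vs O(P^2)); a timing run measured B far ahead (A timed out on most large inputs) but could not confirm the label under its rules.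
import Mathlib
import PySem

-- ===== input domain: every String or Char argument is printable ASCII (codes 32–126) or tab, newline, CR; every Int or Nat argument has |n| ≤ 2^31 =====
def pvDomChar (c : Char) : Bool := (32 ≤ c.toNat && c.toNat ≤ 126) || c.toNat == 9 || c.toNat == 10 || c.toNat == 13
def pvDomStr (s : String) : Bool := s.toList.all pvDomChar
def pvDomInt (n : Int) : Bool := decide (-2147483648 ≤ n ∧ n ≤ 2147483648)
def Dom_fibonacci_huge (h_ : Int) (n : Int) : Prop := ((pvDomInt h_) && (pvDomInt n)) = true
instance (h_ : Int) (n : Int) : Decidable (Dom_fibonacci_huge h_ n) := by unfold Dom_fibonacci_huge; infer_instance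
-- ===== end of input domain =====

-- B replaces A's grow-a-list-and-compare-halves Pisano-period search by a constant-time
-- per-step test that the residue pair has returned to its start, then recomputes
-- F(h mod period) mod n directly (a different algorithm with lighter per-step work).


-- ===== PORT A =====
-- A's `while s[:k]!=s[k:] or k<1` loop, ported with fuel; the fuel 2*n.toNat^2+3 is proved
-- sufficient below (pigeonhole: the pair sequence mod n returns to (0,1) within n^2 steps,
-- so the loop exits after exactly 2*period ≤ 2*n^2 iterations and the 0-returning fuel-out
-- branch is never taken).  k = len(s)//2 ≥ 0 is carried as a Nat (len(s)//2 = s.length / 2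
-- exactly).  Python's final s[h%k] cannot raise (0 ≤ h%k < k < len(s)), so pyGetD's default
-- is never used.
def fhLoopA (h_ n : Int) : Nat → List Int → Int → Int → Nat → Int
  | 0, _, _, _, _ => 0
  | fuel+1, s, a, b, k =>
    if PySem.List.slice s none (some (k:Int)) ≠ PySem.List.slice s (some (k:Int)) none ∨ k < 1 then
      fhLoopA h_ n fuel (s ++ [PySem.Int.mod a n]) b (a + b) ((s ++ [PySem.Int.mod a n]).length / 2)
    else
      PySem.List.pyGetD s (PySem.Int.mod h_ (k : Int)) 0

def fibonacci_huge (h_ : Int) (n : Int) : Int :=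
  if n ≤ 1 then 0
  else fhLoopA h_ n (2 * n.toNat ^ 2 + 3) [] 0 1 0

-- ===== PORT B =====
-- B's `while True: a, b = b, (a+b) % n; period += 1; if a == 0 and b == 1: break` loop,
-- ported with fuel; fuel n.toNat^2+2 is proved sufficient below (the period is ≤ n^2).
def fhFindPeriod (n : Int) : Nat → Int → Int → Nat → Nat
  | 0, _, _, p => p
  | fuel+1, a, b, p =>
    if b = 0 ∧ PySem.Int.mod (a + b) n = 1 then p + 1
    else fhFindPeriod n fuel b (PySem.Int.mod (a + b) n) (p + 1)

-- B's `for _ in range(r): x, y = y, (x+y) % n` recurrence (r = h % period ≥ 0, so toNat is exact)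
def fhFib (n : Int) : Nat → Int × Int
  | 0 => (0, 1)
  | r+1 => ((fhFib n r).2, PySem.Int.mod ((fhFib n r).1 + (fhFib n r).2) n)

def fibonacci_huge_alt (h_ : Int) (n : Int) : Int :=
  if n ≤ 1 then 0
  else
    let period := fhFindPeriod n (n.toNat ^ 2 + 2) 0 1 0
    (fhFib n (PySem.Int.mod h_ (period : Int)).toNat).1

-- ===== PRECONDITION & SPEC =====
def Spec_fibonacci_huge (h_ : Int) (n : Int) (out : Int) : Prop := out = fibonacci_huge_alt h_ n
instance (h_ : Int) (n : Int) (out : Int) : Decidable (Spec_fibonacci_huge h_ n out) := by unfold Spec_fibonacci_huge; infer_instance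

-- ===== CLAIM (what is proved, stated in full; the proofs are below) =====
def Claim_equal_fibonacci_huge : Prop := ∀ (h_ : Int) (n : Int), Dom_fibonacci_huge h_ n → Spec_fibonacci_huge h_ n (fibonacci_huge h_ n)

-- ===== LEMMAS AND PROOFS =====

-- both components of the pair sequence stay in [0, n)
lemma fhFib_bounds (n : Int) (hn : 2 ≤ n) (i : Nat) :
    0 ≤ (fhFib n i).1 ∧ (fhFib n i).1 < n ∧ 0 ≤ (fhFib n i).2 ∧ (fhFib n i).2 < n := by
  induction i with
  | zero => simp [fhFib]; omega
  | succ i ih =>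
    exact ⟨ih.2.2.1, ih.2.2.2, PySem.Int.mod_nonneg _ (by omega), PySem.Int.mod_lt _ (by omega)⟩

-- the pair step is injective on in-range pairs, so the sequence can be run backwards
lemma fhFib_back (n : Int) (hn : 2 ≤ n) (i j : Nat)
    (h : fhFib n (i+1) = fhFib n (j+1)) : fhFib n i = fhFib n j := by
  have hi := fhFib_bounds n hn i
  have hj := fhFib_bounds n hn j
  have h1 : (fhFib n i).2 = (fhFib n j).2 := congrArg Prod.fst h
  have h2 : PySem.Int.mod ((fhFib n i).1 + (fhFib n i).2) n
          = PySem.Int.mod ((fhFib n j).1 + (fhFib n j).2) n := congrArg Prod.snd h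
  rw [PySem.Int.mod_eq_emod_of_pos (show (0:Int) < n by omega),
      PySem.Int.mod_eq_emod_of_pos (show (0:Int) < n by omega), h1] at h2
  have e1 := Int.sub_emod ((fhFib n i).1 + (fhFib n j).2) ((fhFib n j).2) n
  have e2 := Int.sub_emod ((fhFib n j).1 + (fhFib n j).2) ((fhFib n j).2) n
  rw [add_sub_cancel_right] at e1 e2
  rw [h2] at e1
  have hmi : (fhFib n i).1 % n = (fhFib n i).1 := Int.emod_eq_of_lt hi.1 hi.2.1
  have hmj : (fhFib n j).1 % n = (fhFib n j).1 := Int.emod_eq_of_lt hj.1 hj.2.1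
  exact Prod.ext (by rw [← hmi, ← hmj, e1, e2]) h1

-- a repeated pair anywhere gives a return to the start
lemma fhFib_shift (n : Int) (hn : 2 ≤ n) (i t : Nat)
    (h : fhFib n (i + t) = fhFib n i) : fhFib n t = (0, 1) := by
  induction i with
  | zero => simpa using h
  | succ i ih =>
    apply ih
    apply fhFib_back n hn
    have e : i + 1 + t = (i + t) + 1 := by omega
    rw [← e]; exact h

-- pigeonhole: the pair sequence returns to (0,1) within n^2 steps
lemma fhFib_exists (n : Int) (hn : 2 ≤ n) :
    ∃ t, (0 < t ∧ fhFib n t = (0, 1)) ∧ t ≤ n.toNat ^ 2 := by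
  have key : ∀ i j : Nat, i < j → j ≤ n.toNat ^ 2 → fhFib n i = fhFib n j →
      ∃ t, (0 < t ∧ fhFib n t = (0, 1)) ∧ t ≤ n.toNat ^ 2 := by
    intro i j hij hjN heq
    have e : fhFib n (i + (j - i)) = fhFib n i := by
      rw [Nat.add_sub_cancel' hij.le]; exact heq.symm
    exact ⟨j - i, ⟨by omega, fhFib_shift n hn i (j - i) e⟩, by omega⟩
  have hmap : ∀ i ∈ Finset.range (n.toNat ^ 2 + 1),
      fhFib n i ∈ Finset.Ico (0:Int) n ×ˢ Finset.Ico (0:Int) n := by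
    intro i _
    have h := fhFib_bounds n hn i
    simp only [Finset.mem_product, Finset.mem_Ico]
    exact ⟨⟨h.1, h.2.1⟩, ⟨h.2.2.1, h.2.2.2⟩⟩
  have hcard : (Finset.Ico (0:Int) n ×ˢ Finset.Ico (0:Int) n).card
      < (Finset.range (n.toNat ^ 2 + 1)).card := by
    rw [Finset.card_product, Finset.card_range, Int.card_Ico]
    simp [pow_two]
  obtain ⟨i, hi, j, hj, hne, heq⟩ :=
    Finset.exists_ne_map_eq_of_card_lt_of_maps_to hcard hmap
  simp only [Finset.mem_range] at hi hj
  rcases Nat.lt_trichotomy i j with h | h | h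
  · exact key i j h (by omega) heq
  · omega
  · exact key j i h (by omega) heq.symm

-- a return to (0,1) is a period of the whole pair sequence
lemma fhFib_period (n : Int) (p : Nat) (hp : fhFib n p = (0, 1)) (i : Nat) :
    fhFib n (i + p) = fhFib n i := by
  induction i with
  | zero => simpa [fhFib] using hp
  | succ i ih =>
    have e : i + 1 + p = (i + p) + 1 := by omega
    rw [e]
    show ((fhFib n (i+p)).2, PySem.Int.mod ((fhFib n (i+p)).1 + (fhFib n (i+p)).2) n) = _
    rw [ih]; rfl

-- the pair sequence is the true Fibonacci pair reduced mod n
lemma fhFib_fib (n : Int) (hn : 2 ≤ n) (m : Nat) :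
    fhFib n m = ((Nat.fib m : Int) % n, (Nat.fib (m+1) : Int) % n) := by
  induction m with
  | zero =>
    simp [fhFib, Nat.fib]
    exact (Int.emod_eq_of_lt (by omega) (by omega)).symm
  | succ m ih =>
    show ((fhFib n m).2, PySem.Int.mod ((fhFib n m).1 + (fhFib n m).2) n) = _
    rw [ih, PySem.Int.mod_eq_emod_of_pos (show (0:Int) < n by omega)]
    refine Prod.ext rfl ?_
    show ((Nat.fib m : Int) % n + (Nat.fib (m+1) : Int) % n) % n = (Nat.fib (m+2) : Int) % n
    rw [← Int.add_emod]
    congr 1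
    push_cast [Nat.fib_add_two]
    ring

-- A's s[:k] == s[k:] test on a length-2k prefix says exactly "k is a window period"
lemma halves_eq_iff (F : Nat → Int) (k : Nat) :
    ((List.range (2*k)).map F).take k = ((List.range (2*k)).map F).drop k ↔
      ∀ i < k, F i = F (k + i) := by
  constructor
  · intro h i hik
    have := congrArg (fun l => l[i]?) h
    simp only [List.getElem?_take, List.getElem?_drop, List.getElem?_map] at this
    simp only [hik, if_pos] at this
    have h1 : i < 2*k := by omega
    have h2 : k + i < 2*k := by omega
    simp [h1, h2] at this
    exact this
  · intro h
    apply List.ext_getElem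
    · simp; omega
    · intro i hi1 hi2
      simp only [List.length_take, List.length_map, List.length_range] at hi1
      have hik : i < k := by omega
      have h1 : i < 2*k := by omega
      have h2 : k + i < 2*k := by omega
      simp [List.getElem_take, List.getElem_drop]
      exact h i hik

-- B's search loop returns exactly the minimal period
lemma loopB_run (n : Int) (hex : ∃ t, 0 < t ∧ fhFib n t = (0, 1)) :
    ∀ (fuel m : Nat), m < Nat.find hex → Nat.find hex ≤ m + fuel →
      fhFindPeriod n fuel (fhFib n m).1 (fhFib n m).2 m = Nat.find hex := by
  intro fuel
  induction fuel with
  | zero => intro m h1 h2; omega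
  | succ fuel ih =>
    intro m h1 h2
    have hstep : fhFib n (m+1) = ((fhFib n m).2, PySem.Int.mod ((fhFib n m).1 + (fhFib n m).2) n) := rfl
    by_cases hc : (fhFib n m).2 = 0 ∧ PySem.Int.mod ((fhFib n m).1 + (fhFib n m).2) n = 1
    · rw [fhFindPeriod, if_pos hc]
      have heq : fhFib n (m+1) = (0, 1) := by rw [hstep, hc.2, hc.1]
      have hle : Nat.find hex ≤ m + 1 := Nat.find_min' hex ⟨by omega, heq⟩
      omega
    · rw [fhFindPeriod, if_neg hc]
      have hne : fhFib n (m+1) ≠ (0, 1) := fun he =>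
        hc ⟨congrArg Prod.fst he, congrArg Prod.snd he⟩
      have hlt : m + 1 < Nat.find hex := by
        rcases Nat.lt_or_ge (m+1) (Nat.find hex) with h | h
        · exact h
        · exact absurd ((Nat.find_spec hex).2) (by
            have : Nat.find hex = m + 1 := by omega
            rw [this]; exact fun he => hne he)
      exact ih (m+1) hlt (by omega)

-- A's loop exits exactly when the list holds two copies of the period, and indexes into it
lemma loopA_run (h_ n : Int) (hn : 2 ≤ n) (hex : ∃ t, 0 < t ∧ fhFib n t = (0, 1)) :
    ∀ (fuel m : Nat), m ≤ 2 * Nat.find hex → 2 * Nat.find hex < m + fuel →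
      fhLoopA h_ n fuel ((List.range m).map (fun i => (fhFib n i).1))
        (Nat.fib m : Int) (Nat.fib (m+1) : Int) (m / 2)
      = (fhFib n (PySem.Int.mod h_ ((Nat.find hex : Nat) : Int)).toNat).1 := by
  have hπpos : 0 < Nat.find hex := (Nat.find_spec hex).1
  have hπ : fhFib n (Nat.find hex) = (0, 1) := (Nat.find_spec hex).2
  intro fuel
  induction fuel with
  | zero => intro m h1 h2; omega
  | succ fuel ih =>
    intro m h1 h2
    by_cases hm : m = 2 * Nat.find hex
    · -- exit case: halves agree, return s[h % k]
      subst hm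
      have hk : 2 * Nat.find hex / 2 = Nat.find hex := by omega
      rw [fhLoopA, hk]
      have heq : ((List.range (2 * Nat.find hex)).map (fun i => (fhFib n i).1)).take (Nat.find hex)
          = ((List.range (2 * Nat.find hex)).map (fun i => (fhFib n i).1)).drop (Nat.find hex) := by
        rw [halves_eq_iff]
        intro i _
        have := fhFib_period n (Nat.find hex) hπ i
        simp only [Nat.add_comm]
        rw [this]
      rw [if_neg]
      · have h0 : (0:Int) < (Nat.find hex : Int) := by exact_mod_cast hπpos
        have hnn : 0 ≤ PySem.Int.mod h_ ((Nat.find hex : Nat) : Int) := PySem.Int.mod_nonneg _ h0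
        have hlt : PySem.Int.mod h_ ((Nat.find hex : Nat) : Int) < (Nat.find hex : Int) :=
          PySem.Int.mod_lt _ h0
        rw [PySem.List.pyGetD_eq_getElem _ _ hnn (by
          simp only [List.length_map, List.length_range]
          push_cast
          omega)]
        have hidx : (PySem.Int.mod h_ ((Nat.find hex : Nat) : Int)).toNat < 2 * Nat.find hex := by
          omega
        simp
      · push Not
        rw [PySem.List.slice_to_natCast, PySem.List.slice_from_natCast]
        exact ⟨heq, by omega⟩
    · -- continue case: halves differ (or k = 0), append F m and recurse
      have hmlt : m < 2 * Nat.find hex := by omega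
      have hcond : (PySem.List.slice ((List.range m).map (fun i => (fhFib n i).1)) none (some ((m/2 : Nat):Int))
            ≠ PySem.List.slice ((List.range m).map (fun i => (fhFib n i).1)) (some ((m/2 : Nat):Int)) none)
          ∨ m / 2 < 1 := by
        rw [PySem.List.slice_to_natCast, PySem.List.slice_from_natCast]
        by_cases hk0 : m / 2 < 1
        · exact Or.inr hk0
        · left
          set k := m / 2 with hkdef
          intro heq
          by_cases hodd : m = 2 * k
          · rw [hodd] at heq
            have hall := (halves_eq_iff (fun i => (fhFib n i).1) k).mp heq
            have hF1 : (fhFib n (1:Nat)).1 = 1 := rfl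
            have hFk : (fhFib n k).1 = 0 := by
              have := hall 0 (by omega)
              simpa using this.symm
            rcases Nat.lt_or_ge k 2 with hk2 | hk2
            · have hk1 : k = 1 := by omega
              rw [hk1, hF1] at hFk
              exact absurd hFk (by norm_num)
            · have hFk1 : (fhFib n (k+1)).1 = 1 := by
                have := hall 1 (by omega)
                simpa [hF1] using this.symm
              have hpair : fhFib n k = (0, 1) := by
                have h2' : (fhFib n k).2 = (fhFib n (k+1)).1 := rfl
                exact Prod.ext hFk (by rw [h2', hFk1])
              have : Nat.find hex ≤ k := Nat.find_min' hex ⟨by omega, hpair⟩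
              omega
          · -- m odd: the two slices have different lengths
            have := congrArg List.length heq
            simp only [List.length_take, List.length_drop, List.length_map, List.length_range] at this
            omega
      rw [fhLoopA, if_pos hcond]
      have hFm : PySem.Int.mod (Nat.fib m : Int) n = (fhFib n m).1 := by
        rw [PySem.Int.mod_eq_emod_of_pos (show (0:Int) < n by omega), fhFib_fib n hn m]
      have hs2 : (List.range m).map (fun i => (fhFib n i).1) ++ [PySem.Int.mod (Nat.fib m : Int) n]
          = (List.range (m+1)).map (fun i => (fhFib n i).1) := by
        rw [hFm, List.range_succ, List.map_append]
        rfl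
      rw [hs2]
      have hlen : ((List.range (m+1)).map (fun i => (fhFib n i).1)).length / 2 = (m+1) / 2 := by
        simp
      rw [hlen]
      have hfib2 : (Nat.fib m : Int) + (Nat.fib (m+1) : Int) = (Nat.fib (m+1+1) : Int) := by
        push_cast [Nat.fib_add_two]
        ring
      rw [hfib2]
      exact ih (m+1) (by omega) (by omega)

-- ===== VERDICT (by name: the statement is the Claim_ definition above) =====
theorem fibonacci_huge_spec : Claim_equal_fibonacci_huge := by
  intro h_ n _
  unfold Spec_fibonacci_huge fibonacci_huge fibonacci_huge_alt
  by_cases hn1 : n ≤ 1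
  · simp [hn1]
  · have hn : 2 ≤ n := by omega
    simp only [hn1, if_false]
    obtain ⟨t0, ht0, htb⟩ := fhFib_exists n hn
    have hex : ∃ t, 0 < t ∧ fhFib n t = (0, 1) := ⟨t0, ht0⟩
    have hπb : Nat.find hex ≤ n.toNat ^ 2 := le_trans (Nat.find_min' hex ht0) htb
    have hB : fhFindPeriod n (n.toNat ^ 2 + 2) 0 1 0 = Nat.find hex :=
      loopB_run n hex (n.toNat ^ 2 + 2) 0 (Nat.find_spec hex).1 (by omega)
    have hA := loopA_run h_ n hn hex (2 * n.toNat ^ 2 + 3) 0 (by omega) (by omega)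
    norm_num at hA
    rw [hB, PySem.Int.mod_eq_emod_of_pos
      (show (0:Int) < (Nat.find hex : Int) by exact_mod_cast (Nat.find_spec hex).1)]
    exact hA
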